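-- pv_equiv track=rewrite | github.com/ibaaj/explainability-of-possibilistic-rule-based-systems | equation-system/main.py | buildBi
-- ===== SOURCE A (Python) =====
-- strmap = {
--     "0": "₀", "1": "₁", "2": "₂", "3": "₃", "4": "₄", "5": "₅", "6": "₆",
--     "7": "₇", "8": "₈", "9": "₉",
--     "lambda": "\u03BB", "alpha": "\u03B1", "beta": "\u03B2", "rho": "\u03C1",
--     "Qbar" : u'Q\u0305', 'bar' : u'\u0305',
--     "in" : 	u"\u2208", "pi" : u"\u03C0", "notequal" : u"\u2260",
--     "tau" : u"\u03C4",
--     "epsilon" : u"\u03B5", "Delta" : u"\u0394"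
--
-- }
--
-- def nbAsStrSub(nb):
--     return ''.join([strmap[c] for c in str(nb)])
--
-- def buildmatrix(matrix,letter1,letter2,n,mode,i = 1):
--     if i == 1:
--         if mode == "uplet":
--             matrix = [(letter1 + nbAsStrSub(1),),(letter2 + nbAsStrSub(1),)]
--         if mode == "func":
--             matrix = [letter1 + nbAsStrSub(1),letter2 + nbAsStrSub(1)]
--     else:
--         matrix1 = []
--         matrix2 = []
--         for x in matrix:
--             l1 = x
--             l2 = x
--             if mode == "uplet":
--                 l1 = l1 + (letter1 + nbAsStrSub(i),)
--                 l2 = l2 + (letter2 + nbAsStrSub(i),)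
--             if mode == "func":
--                 l1 = l1 + letter1 + nbAsStrSub(i)
--                 l2 = l2 + letter2 + nbAsStrSub(i)
--
--             matrix1.append(l1)
--             matrix2.append(l2)
--         matrix = matrix1 + matrix2
--
--     if i == n:
--         return matrix
--     else:
--         return buildmatrix(matrix,letter1,letter2,n,mode,i+1)
--
-- def buildBi(n,x1,y1,x2,y2):
--     m1 = buildmatrix([],x1,y1,n,"uplet")
--     m2 = buildmatrix([],x2,y2,n,"uplet")
--
--     Bi = []
--     for x1,x2 in zip(m1,m2):
--         l = []
--         for y1,y2 in zip(x1,x2):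
--             r = ('max', y1, y2)
--             l.append(r)
--         Bi.append(l.copy())
--     return Bi
-- ===== SOURCE B (Python) =====
-- strmap = {
--     "0": "₀", "1": "₁", "2": "₂", "3": "₃", "4": "₄", "5": "₅", "6": "₆",
--     "7": "₇", "8": "₈", "9": "₉",
-- }
--
-- def nbAsStrSub(nb):
--     return ''.join([strmap[c] for c in str(nb)])
--
-- def buildBi(n, x1, y1, x2, y2):
--     rows = []
--     for j in range(2 ** n):
--         row = []
--         for i in range(1, n + 1):
--             s = nbAsStrSub(i)
--             if (j >> (i - 1)) & 1:
--                 row.append(('max', y1 + s, y2 + s))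
--             else:
--                 row.append(('max', x1 + s, x2 + s))
--         rows.append(row)
--     return rows
-- ===== Notes on version B (the rewrite author's own statement) =====
-- stated objective: simpler
-- what changed: Replaced the doubling recursion that builds two parallel tuple matrices and zips them by a direct double loop: row j of range(2**n) is computed from the bits of j (bit i-1 picks x/y at position i), emitting the ('max', ., .) triples in one pass with no intermediate matrices.
import Mathlib
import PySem

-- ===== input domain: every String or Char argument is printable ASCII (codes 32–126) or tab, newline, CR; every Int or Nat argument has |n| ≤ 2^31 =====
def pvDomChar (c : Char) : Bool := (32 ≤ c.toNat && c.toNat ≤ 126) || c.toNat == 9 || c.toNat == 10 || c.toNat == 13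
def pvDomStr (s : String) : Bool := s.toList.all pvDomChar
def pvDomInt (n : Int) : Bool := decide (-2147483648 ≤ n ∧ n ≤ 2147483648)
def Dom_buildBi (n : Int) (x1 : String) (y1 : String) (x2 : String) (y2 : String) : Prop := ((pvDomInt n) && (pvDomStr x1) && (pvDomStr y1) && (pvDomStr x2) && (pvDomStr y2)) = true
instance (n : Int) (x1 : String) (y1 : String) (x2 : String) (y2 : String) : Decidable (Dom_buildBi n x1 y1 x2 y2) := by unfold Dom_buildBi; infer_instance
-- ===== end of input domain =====

-- B replaces A's doubling recursion (two parallel tuple matrices, then zipped) by a direct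
-- double loop that reads row j's choices off the bits of j; same cost, simpler structure.

-- ===== PORT A =====
-- nbAsStrSub(i): subscript digits of str(i); only called on positive ints here, so only
-- digit characters occur (non-digits are mapped to themselves for totality, never reached).
def subChar (c : Char) : Char :=
  if c = '0' then '₀' else if c = '1' then '₁' else if c = '2' then '₂'
  else if c = '3' then '₃' else if c = '4' then '₄' else if c = '5' then '₅'
  else if c = '6' then '₆' else if c = '7' then '₇' else if c = '8' then '₈'
  else if c = '9' then '₉' else c

def nbSub (i : Int) : String := String.ofList ((PySem.Int.toStr i).toList.map subChar)

-- buildmatrix in "uplet" mode (the only mode buildBi uses); Python tuples of varying length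
-- become List String.  The recursion diverges in Python when i > n can be reached (n ≤ 0);
-- the final 'else m' branch is a totality guard only reachable outside Pre_.
def buildmatrixA (matrix : List (List String)) (l1 l2 : String) (n i : Int) :
    List (List String) :=
  let m := if i = 1 then [[l1 ++ nbSub 1], [l2 ++ nbSub 1]]
           else matrix.map (fun x => x ++ [l1 ++ nbSub i]) ++
                matrix.map (fun x => x ++ [l2 ++ nbSub i])
  if i = n then m
  else if i < n then buildmatrixA m l1 l2 n (i + 1)
  else m
termination_by (n - i).toNat
decreasing_by omega

def buildBi (n : Int) (x1 : String) (y1 : String) (x2 : String) (y2 : String) : List (List (String × String × String)) :=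
  let m1 := buildmatrixA [] x1 y1 n 1
  let m2 := buildmatrixA [] x2 y2 n 1
  (m1.zip m2).map (fun p => (p.1.zip p.2).map (fun q => ("max", q.1, q.2)))

-- ===== PORT B =====
def buildBi_alt (n : Int) (x1 : String) (y1 : String) (x2 : String) (y2 : String) : List (List (String × String × String)) :=
  (List.range (2 ^ n.toNat)).map (fun (j : Nat) =>
    (List.range n.toNat).map (fun (i0 : Nat) =>
      let s := nbSub ((i0 : Int) + 1)
      if (j >>> i0) &&& 1 = 1 then ("max", y1 ++ s, y2 ++ s)
      else ("max", x1 ++ s, x2 ++ s)))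

-- ===== PRECONDITION & SPEC =====
-- For n ≤ 0 Python A's buildmatrix recursion never reaches i == n and diverges
-- (doubling its matrix each level until the process dies), so those inputs are excluded.
def Pre_buildBi (n : Int) (x1 : String) (y1 : String) (x2 : String) (y2 : String) : Prop := 1 ≤ n
instance (n : Int) (x1 : String) (y1 : String) (x2 : String) (y2 : String) : Decidable (Pre_buildBi n x1 y1 x2 y2) := by unfold Pre_buildBi; infer_instance

def pvWitness_buildBi : Int × String × String × String × String := (2, "x", "y", "u", "v")

def Spec_buildBi (n : Int) (x1 : String) (y1 : String) (x2 : String) (y2 : String) (out : List (List (String × String × String))) : Prop := out = buildBi_alt n x1 y1 x2 y2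
instance (n : Int) (x1 : String) (y1 : String) (x2 : String) (y2 : String) (out : List (List (String × String × String))) : Decidable (Spec_buildBi n x1 y1 x2 y2 out) := by unfold Spec_buildBi; infer_instance

-- ===== CLAIM (what is proved, stated in full; the proofs are below) =====
def Claim_equal_buildBi : Prop := ∀ (n : Int) (x1 : String) (y1 : String) (x2 : String) (y2 : String), Dom_buildBi n x1 y1 x2 y2 → Pre_buildBi n x1 y1 x2 y2 → Spec_buildBi n x1 y1 x2 y2 (buildBi n x1 y1 x2 y2)

-- ===== LEMMAS AND PROOFS =====

-- closed form of buildmatrixA's state: row j of 2^k chooses l1/l2 at position i0 by bit i0 of j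
def rowsF (l1 l2 : String) (k : Nat) : List (List String) :=
  (List.range (2 ^ k)).map (fun j =>
    (List.range k).map (fun i0 =>
      (if Nat.testBit j i0 then l2 else l1) ++ nbSub ((i0 : Int) + 1)))

lemma bit_cond (j i : Nat) : ((j >>> i) &&& 1 = 1) = (Nat.testBit j i = true) := by
  simp [Nat.testBit, Nat.and_comm, Nat.and_one_is_mod]

lemma rowsF_one (l1 l2 : String) : rowsF l1 l2 1 = [[l1 ++ nbSub 1], [l2 ++ nbSub 1]] := by
  simp [rowsF, List.range_succ]

lemma rowsF_succ (l1 l2 : String) (k : Nat) :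
    rowsF l1 l2 (k + 1) =
      (rowsF l1 l2 k).map (fun x => x ++ [l1 ++ nbSub ((k : Int) + 1)]) ++
      (rowsF l1 l2 k).map (fun x => x ++ [l2 ++ nbSub ((k : Int) + 1)]) := by
  unfold rowsF
  have h2 : 2 ^ (k + 1) = 2 ^ k + 2 ^ k := by ring
  rw [h2, show List.range (2 ^ k + 2 ^ k) =
        List.range (2 ^ k) ++ List.map (fun x => 2 ^ k + x) (List.range (2 ^ k)) from
        List.range_add, List.map_append]
  simp only [List.map_map]
  congr 1
  · refine List.map_congr_left (fun j hj => ?_)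
    rw [List.mem_range] at hj
    simp only [Function.comp_apply]
    rw [List.range_succ, List.map_append]
    simp [Nat.testBit_lt_two_pow hj]
  · refine List.map_congr_left (fun j hj => ?_)
    rw [List.mem_range] at hj
    simp only [Function.comp_apply]
    rw [List.range_succ, List.map_append]
    have hk : Nat.testBit (2 ^ k + j) k = true := by
      rw [Nat.testBit_two_pow_add_eq, Nat.testBit_lt_two_pow hj]; rfl
    simp only [hk, List.map_cons, List.map_nil, if_pos]
    congr 1
    refine List.map_congr_left (fun i0 hi0 => ?_)
    rw [List.mem_range] at hi0
    rw [Nat.testBit_two_pow_add_gt hi0]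

lemma step_eq (l1 l2 : String) (i : Int) (M : List (List String)) (h1 : 1 ≤ i)
    (hM : i = 1 ∨ M = rowsF l1 l2 (i - 1).toNat) :
    (if i = 1 then [[l1 ++ nbSub 1], [l2 ++ nbSub 1]]
     else M.map (fun x => x ++ [l1 ++ nbSub i]) ++ M.map (fun x => x ++ [l2 ++ nbSub i])) =
    rowsF l1 l2 i.toNat := by
  by_cases hi : i = 1
  · subst hi
    rw [if_pos rfl, show Int.toNat 1 = 1 from rfl, rowsF_one]
  · rcases hM with h | h
    · exact absurd h hi
    · subst h
      rw [if_neg hi]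
      have e2 : i.toNat = (i - 1).toNat + 1 := by omega
      have e1 : (((i - 1).toNat : Int)) + 1 = i := by omega
      rw [e2, rowsF_succ, e1]

lemma bm_eq (l1 l2 : String) : ∀ (k : Nat) (n i : Int) (M : List (List String)),
    1 ≤ i → i ≤ n → n - i = (k : Int) → (i = 1 ∨ M = rowsF l1 l2 (i - 1).toNat) →
    buildmatrixA M l1 l2 n i = rowsF l1 l2 n.toNat := by
  intro k
  induction k with
  | zero =>
    intro n i M h1 hle hk hM
    have hin : i = n := by omega
    rw [buildmatrixA]
    simp only [step_eq l1 l2 i M h1 hM]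
    rw [if_pos hin, hin]
  | succ k ih =>
    intro n i M h1 hle hk hM
    have hlt : i < n := by omega
    rw [buildmatrixA]
    simp only [step_eq l1 l2 i M h1 hM]
    rw [if_neg (by omega : ¬ i = n), if_pos hlt]
    refine ih n (i + 1) _ (by omega) (by omega) (by omega) (Or.inr ?_)
    have : (i + 1 - 1).toNat = i.toNat := by omega
    rw [this]

theorem buildBi_spec : Claim_equal_buildBi := by
  intro n x1 y1 x2 y2 hdom hpre
  unfold Spec_buildBi
  have hpre' : (1 : Int) ≤ n := hpre
  have h1 : buildmatrixA [] x1 y1 n 1 = rowsF x1 y1 n.toNat :=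
    bm_eq x1 y1 (n - 1).toNat n 1 [] (by omega) hpre' (by omega) (Or.inl rfl)
  have h2 : buildmatrixA [] x2 y2 n 1 = rowsF x2 y2 n.toNat :=
    bm_eq x2 y2 (n - 1).toNat n 1 [] (by omega) hpre' (by omega) (Or.inl rfl)
  simp only [buildBi, buildBi_alt, h1, h2]
  rw [rowsF, rowsF, List.zip_map', List.map_map]
  refine List.map_congr_left (fun j _ => ?_)
  simp only [Function.comp]
  rw [List.zip_map', List.map_map]
  refine List.map_congr_left (fun i0 _ => ?_)
  simp only [Function.comp, bit_cond]
  by_cases hb : Nat.testBit j i0 <;> simp [hb]
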